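-- pv_equiv track=rewrite | github.com/cthadeufaria/INFI_ERP | mps.py | expedition_orders
-- ===== SOURCE A (Python) =====
-- def expedition_orders(stock_finished, today_orders, today):
--     # expedition_orders = [
--     #     (
--     #         t[0],
--     #         t[7],
--     #         min(s[3], t[3]),
--     #         today
--     #     )
--     #     for t in today_orders
--     #     for s in stock_finished
--     #     if (s[2] == t[7]) and (s[3] - t[3] >= 0)
--     # ]
--
--     stock_finished = [list(s) for s in stock_finished]
--
--     expedition_orders = []
--     for t in today_orders:
--         for s in stock_finished:
--             if (s[2] == t[7]) and (s[3] - t[3] >= 0):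
--                 expedition_orders.append((t[0], t[7], t[3], today))
--                 s[3] -= t[3]
--
--     stock_finished_updated = [tuple(s) for s in stock_finished]
--
--     # stock_finished_updated = [
--     #     tuple([
--     #         s[1] + 1,
--     #         s[2],
--     #         s[3] - o[2]
--     #     ])
--     #     for s in stock_finished
--     #     for o in expedition_orders
--     #     if s[2] == o[1]
--     # ]
--
--     return [e for e in expedition_orders if e[2] > 0], stock_finished_updated
-- ===== SOURCE B (Python) =====
-- def expedition_orders(stock_finished, today_orders, today):
--     # Stock-major traversal (loop interchange): stock rows never interact, so each
--     # row is run once through the whole order stream; expedition tuples within one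
--     # order are all identical, so a per-order acceptance count rebuilds the list.
--     counts = [0] * len(today_orders)
--     updated = []
--     for s in stock_finished:
--         q = s[3]
--         flags = []
--         for t in today_orders:
--             if t[7] == s[2] and q >= t[3]:
--                 q -= t[3]
--                 flags.append(1)
--             else:
--                 flags.append(0)
--         counts = [c + f for c, f in zip(counts, flags)]
--         updated.append((s[0], s[1], s[2], q))
--     exped = [(t[0], t[7], t[3], today)
--              for t, c in zip(today_orders, counts)
--              for _ in range(c)
--              if t[3] > 0]
--     return exped, updated
-- ===== Notes on version B (the rewrite author's own statement) =====
-- stated objective: alternative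
-- what changed: B interchanges the loops: instead of A's order-major pass that rescans and mutates the whole stock list per order, B runs each stock row independently once through the full order stream (valid because rows never interact), accumulates a per-order acceptance count, and rebuilds the expedition list from those counts since all tuples emitted for one order are identical.
import Mathlib
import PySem

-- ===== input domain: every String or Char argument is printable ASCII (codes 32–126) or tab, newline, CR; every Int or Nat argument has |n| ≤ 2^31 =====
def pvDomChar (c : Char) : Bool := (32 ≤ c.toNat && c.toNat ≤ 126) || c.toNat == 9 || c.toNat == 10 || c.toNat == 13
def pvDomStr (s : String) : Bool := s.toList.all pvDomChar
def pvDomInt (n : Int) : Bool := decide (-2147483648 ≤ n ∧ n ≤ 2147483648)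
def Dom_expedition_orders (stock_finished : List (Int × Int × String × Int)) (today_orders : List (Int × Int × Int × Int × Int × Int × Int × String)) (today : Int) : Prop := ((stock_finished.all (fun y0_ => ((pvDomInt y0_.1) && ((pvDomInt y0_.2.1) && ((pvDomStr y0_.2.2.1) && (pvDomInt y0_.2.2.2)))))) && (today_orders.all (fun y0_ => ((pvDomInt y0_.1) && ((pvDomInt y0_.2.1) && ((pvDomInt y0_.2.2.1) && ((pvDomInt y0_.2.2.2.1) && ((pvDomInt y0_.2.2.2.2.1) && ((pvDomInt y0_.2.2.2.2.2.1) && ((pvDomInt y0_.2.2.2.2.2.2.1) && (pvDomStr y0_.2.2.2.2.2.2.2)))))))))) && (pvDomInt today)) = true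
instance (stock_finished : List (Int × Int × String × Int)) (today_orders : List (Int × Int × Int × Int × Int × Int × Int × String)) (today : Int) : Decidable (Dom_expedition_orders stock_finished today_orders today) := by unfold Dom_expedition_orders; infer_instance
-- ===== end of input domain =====

-- B interchanges A's loops: a stock-major single pass per row plus per-order acceptance
-- counts replaces A's order-major rescans of the whole mutable stock list (objective:
-- alternative algorithm; same asymptotic cost).

-- ===== PORT A =====
-- inner 'for s in stock_finished' loop of A: scan the whole (mutable) stock list, appending one
-- expedition tuple and decrementing s[3] whenever s[2] == t[7] and s[3] - t[3] >= 0
def pvInnerA (t : Int × Int × Int × Int × Int × Int × Int × String) (today : Int) :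
    List (Int × Int × String × Int) → (List (Int × String × Int × Int)) × (List (Int × Int × String × Int))
  | [] => ([], [])
  | s :: rest =>
      if s.2.2.1 == t.2.2.2.2.2.2.2 && decide (s.2.2.2 - t.2.2.2.1 ≥ 0) then
        let r := pvInnerA t today rest
        ((t.1, t.2.2.2.2.2.2.2, t.2.2.2.1, today) :: r.1,
         (s.1, s.2.1, s.2.2.1, s.2.2.2 - t.2.2.2.1) :: r.2)
      else
        let r := pvInnerA t today rest
        (r.1, s :: r.2)

-- one iteration of A's outer 'for t in today_orders' loop
def pvStepA (today : Int)
    (acc : (List (Int × String × Int × Int)) × (List (Int × Int × String × Int)))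
    (t : Int × Int × Int × Int × Int × Int × Int × String) :
    (List (Int × String × Int × Int)) × (List (Int × Int × String × Int)) :=
  let p := pvInnerA t today acc.2
  (acc.1 ++ p.1, p.2)

def expedition_orders (stock_finished : List (Int × Int × String × Int)) (today_orders : List (Int × Int × Int × Int × Int × Int × Int × String)) (today : Int) : (List (Int × String × Int × Int)) × (List (Int × Int × String × Int)) :=
  let r := today_orders.foldl (pvStepA today) ([], stock_finished)
  (r.1.filter (fun e => decide (e.2.2.1 > 0)), r.2)

-- ===== PORT B =====
-- Source B's inner 'for t in today_orders' loop for one stock row: thread the row's quantity q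
-- through the orders, recording a 1/0 flag per order
def pvRowLoop (orders : List (Int × Int × Int × Int × Int × Int × Int × String))
    (q : Int) (p : String) : Int × List Int :=
  match orders with
  | [] => (q, [])
  | t :: rest =>
      if t.2.2.2.2.2.2.2 == p && decide (q ≥ t.2.2.2.1) then
        let r := pvRowLoop rest (q - t.2.2.2.1) p
        (r.1, 1 :: r.2)
      else
        let r := pvRowLoop rest q p
        (r.1, 0 :: r.2)

-- one iteration of Source B's outer 'for s in stock_finished' loop: add the row's flags into
-- counts (zip-add) and append the updated row
def pvStepB (orders : List (Int × Int × Int × Int × Int × Int × Int × String))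
    (acc : List Int × List (Int × Int × String × Int)) (s : Int × Int × String × Int) :
    List Int × List (Int × Int × String × Int) :=
  let r := pvRowLoop orders s.2.2.2 s.2.2.1
  (List.zipWith (· + ·) acc.1 r.2, acc.2 ++ [(s.1, s.2.1, s.2.2.1, r.1)])

def expedition_orders_alt (stock_finished : List (Int × Int × String × Int)) (today_orders : List (Int × Int × Int × Int × Int × Int × Int × String)) (today : Int) : (List (Int × String × Int × Int)) × (List (Int × Int × String × Int)) :=
  let r := stock_finished.foldl (pvStepB today_orders) (List.replicate today_orders.length 0, [])
  -- Source B's final comprehension: per order, 'range(c)' copies of the tuple when t[3] > 0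
  ((today_orders.zip r.1).flatMap (fun tc =>
      if decide (tc.1.2.2.2.1 > 0) then
        List.replicate tc.2.toNat (tc.1.1, tc.1.2.2.2.2.2.2.2, tc.1.2.2.2.1, today)
      else []),
   r.2)

-- ===== PRECONDITION & SPEC =====
def Spec_expedition_orders (stock_finished : List (Int × Int × String × Int)) (today_orders : List (Int × Int × Int × Int × Int × Int × Int × String)) (today : Int) (out : (List (Int × String × Int × Int)) × (List (Int × Int × String × Int))) : Prop := out = expedition_orders_alt stock_finished today_orders today
instance (stock_finished : List (Int × Int × String × Int)) (today_orders : List (Int × Int × Int × Int × Int × Int × Int × String)) (today : Int) (out : (List (Int × String × Int × Int)) × (List (Int × Int × String × Int))) : Decidable (Spec_expedition_orders stock_finished today_orders today out) := by unfold Spec_expedition_orders; infer_instance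

-- ===== CLAIM (what is proved, stated in full; the proofs are below) =====
def Claim_equal_expedition_orders : Prop := ∀ (stock_finished : List (Int × Int × String × Int)) (today_orders : List (Int × Int × Int × Int × Int × Int × Int × String)) (today : Int), Dom_expedition_orders stock_finished today_orders today → Spec_expedition_orders stock_finished today_orders today (expedition_orders stock_finished today_orders today)

-- ===== LEMMAS AND PROOFS =====

-- does order t accept stock row s (A's guard)?
def pvAcc (t : Int × Int × Int × Int × Int × Int × Int × String) (s : Int × Int × String × Int) : Bool :=
  s.2.2.1 == t.2.2.2.2.2.2.2 && decide (s.2.2.2 - t.2.2.2.1 ≥ 0)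

-- effect of order t on stock row s
def pvRowStep (t : Int × Int × Int × Int × Int × Int × Int × String) (s : Int × Int × String × Int) :
    Int × Int × String × Int :=
  if pvAcc t s then (s.1, s.2.1, s.2.2.1, s.2.2.2 - t.2.2.2.1) else s

def pvTup (today : Int) (t : Int × Int × Int × Int × Int × Int × Int × String) :
    Int × String × Int × Int :=
  (t.1, t.2.2.2.2.2.2.2, t.2.2.2.1, today)

-- A's expedition output, orders-major, with the evolving stock made explicit
def pvAExp (today : Int) : List (Int × Int × Int × Int × Int × Int × Int × String) →
    List (Int × Int × String × Int) → List (Int × String × Int × Int)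
  | [], _ => []
  | t :: rest, st =>
      List.replicate (st.countP (pvAcc t)) (pvTup today t) ++ pvAExp today rest (st.map (pvRowStep t))

-- A's per-order acceptance counts, orders-major
def pvACounts : List (Int × Int × Int × Int × Int × Int × Int × String) →
    List (Int × Int × String × Int) → List Int
  | [], _ => []
  | t :: rest, st => ((st.countP (pvAcc t) : Nat) : Int) :: pvACounts rest (st.map (pvRowStep t))

-- A's final stock, orders-major
def pvAFin : List (Int × Int × Int × Int × Int × Int × Int × String) →
    List (Int × Int × String × Int) → List (Int × Int × String × Int)
  | [], st => st
  | t :: rest, st => pvAFin rest (st.map (pvRowStep t))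

theorem pvInnerA_eq (t : Int × Int × Int × Int × Int × Int × Int × String) (today : Int)
    (st : List (Int × Int × String × Int)) :
    pvInnerA t today st = (List.replicate (st.countP (pvAcc t)) (pvTup today t), st.map (pvRowStep t)) := by
  induction st with
  | nil => rfl
  | cons s rest ih =>
      by_cases h : (s.2.2.1 == t.2.2.2.2.2.2.2 && decide (s.2.2.2 - t.2.2.2.1 ≥ 0)) = true
      · simp only [pvInnerA, ih, List.countP_cons, pvAcc, pvTup, h, if_true,
          List.replicate_succ]
        have h' : pvAcc t s = true := h
        simp [pvRowStep, h']
      · rw [Bool.not_eq_true] at h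
        simp only [pvInnerA, ih, List.countP_cons, pvAcc, pvTup, h,
          Bool.false_eq_true, if_false]
        have h' : pvAcc t s = false := h
        simp [pvRowStep, h']

theorem pvFoldA_eq (today : Int) (orders : List (Int × Int × Int × Int × Int × Int × Int × String)) :
    ∀ (E : List (Int × String × Int × Int)) (st : List (Int × Int × String × Int)),
      orders.foldl (pvStepA today) (E, st) = (E ++ pvAExp today orders st, pvAFin orders st) := by
  induction orders with
  | nil => intro E st; simp [pvAExp, pvAFin]
  | cons t rest ih =>
      intro E st
      simp only [List.foldl_cons, pvStepA, pvInnerA_eq, pvAExp, pvAFin]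
      rw [ih]
      simp [List.append_assoc]

-- the filtered expedition list, from the counts
theorem pvAExp_filter (today : Int) (orders : List (Int × Int × Int × Int × Int × Int × Int × String)) :
    ∀ st : List (Int × Int × String × Int),
      (pvAExp today orders st).filter (fun e => decide (e.2.2.1 > 0)) =
        (orders.zip (pvACounts orders st)).flatMap (fun tc =>
          if decide (tc.1.2.2.2.1 > 0) then List.replicate tc.2.toNat (pvTup today tc.1) else []) := by
  induction orders with
  | nil => intro st; rfl
  | cons t rest ih =>
      intro st
      simp only [pvAExp, pvACounts, List.zip_cons_cons, List.flatMap_cons, List.filter_append, ih]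
      congr 1
      by_cases h : t.2.2.2.1 > 0
      · simp [pvTup, h]
      · simp [pvTup, h]

-- pvRowLoop on (t :: rest): head flag and shifted tail
theorem pvRowLoop_cons (t : Int × Int × Int × Int × Int × Int × Int × String)
    (rest : List (Int × Int × Int × Int × Int × Int × Int × String)) (s : Int × Int × String × Int) :
    pvRowLoop (t :: rest) s.2.2.2 s.2.2.1 =
      (((pvRowLoop rest (pvRowStep t s).2.2.2 (pvRowStep t s).2.2.1).1),
        (if pvAcc t s then (1 : Int) else 0) ::
          (pvRowLoop rest (pvRowStep t s).2.2.2 (pvRowStep t s).2.2.1).2) := by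
  have hacc : (t.2.2.2.2.2.2.2 == s.2.2.1 && decide (s.2.2.2 ≥ t.2.2.2.1)) = pvAcc t s := by
    have hd : decide (s.2.2.2 ≥ t.2.2.2.1) = decide (s.2.2.2 - t.2.2.2.1 ≥ 0) := by
      rw [decide_eq_decide]; omega
    rw [pvAcc, hd, BEq.comm]
  by_cases h : pvAcc t s = true
  · simp [pvRowLoop, hacc, h, pvRowStep]
  · simp only [Bool.not_eq_true] at h
    simp [pvRowLoop, hacc, h, pvRowStep]

-- the counts fold with a cons head splits: head sums the flags, tail recurses on stepped rows
theorem pvCounts_cons (t : Int × Int × Int × Int × Int × Int × Int × String)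
    (rest : List (Int × Int × Int × Int × Int × Int × Int × String))
    (st : List (Int × Int × String × Int)) :
    ∀ (c0 : Int) (cs : List Int),
      st.foldl (fun c s => List.zipWith (· + ·) c (pvRowLoop (t :: rest) s.2.2.2 s.2.2.1).2) (c0 :: cs) =
        (c0 + (st.countP (pvAcc t) : Nat)) ::
          (st.map (pvRowStep t)).foldl
            (fun c s => List.zipWith (· + ·) c (pvRowLoop rest s.2.2.2 s.2.2.1).2) cs := by
  induction st with
  | nil => intro c0 cs; simp
  | cons s str ih =>
      intro c0 cs
      rw [List.foldl_cons, pvRowLoop_cons]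
      by_cases h : pvAcc t s = true
      · simp only [h, List.zipWith_cons_cons]
        rw [ih]
        simp [h]
        ring_nf
      · simp only [Bool.not_eq_true] at h
        simp only [h, Bool.false_eq_true, if_false, List.zipWith_cons_cons]
        rw [ih]
        simp [h]

-- B's row-major counts equal A's orders-major counts
theorem pvCounts_eq (orders : List (Int × Int × Int × Int × Int × Int × Int × String)) :
    ∀ st : List (Int × Int × String × Int),
      st.foldl (fun c s => List.zipWith (· + ·) c (pvRowLoop orders s.2.2.2 s.2.2.1).2)
          (List.replicate orders.length 0) = pvACounts orders st := by
  induction orders with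
  | nil =>
      intro st
      induction st with
      | nil => rfl
      | cons s str ih => simpa [pvRowLoop] using ih
  | cons t rest ih =>
      intro st
      rw [List.length_cons, List.replicate_succ, pvCounts_cons]
      simp [pvACounts, ih]

-- B's pair fold splits into the counts fold and the updated-rows map
theorem pvFoldB_split (orders : List (Int × Int × Int × Int × Int × Int × Int × String))
    (st : List (Int × Int × String × Int)) :
    ∀ (c : List Int) (u : List (Int × Int × String × Int)),
      st.foldl (pvStepB orders) (c, u) =
        (st.foldl (fun c s => List.zipWith (· + ·) c (pvRowLoop orders s.2.2.2 s.2.2.1).2) c,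
         u ++ st.map (fun s => (s.1, s.2.1, s.2.2.1, (pvRowLoop orders s.2.2.2 s.2.2.1).1))) := by
  induction st with
  | nil => intro c u; simp
  | cons s str ih =>
      intro c u
      simp only [List.foldl_cons, pvStepB, List.map_cons]
      rw [ih]
      simp

-- A's final stock equals B's per-row updated stock
theorem pvAFin_eq (orders : List (Int × Int × Int × Int × Int × Int × Int × String)) :
    ∀ st : List (Int × Int × String × Int),
      pvAFin orders st = st.map (fun s => (s.1, s.2.1, s.2.2.1, (pvRowLoop orders s.2.2.2 s.2.2.1).1)) := by
  induction orders with
  | nil =>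
      intro st
      simp only [pvAFin]
      conv_lhs => rw [← List.map_id st]
      refine List.map_congr_left ?_
      intro s _
      simp [pvRowLoop]
  | cons t rest ih =>
      intro st
      simp only [pvAFin, ih, List.map_map]
      refine List.map_congr_left ?_
      intro s _
      simp only [Function.comp_apply, pvRowLoop_cons]
      obtain ⟨h1, h2, h3⟩ :
          (pvRowStep t s).1 = s.1 ∧ (pvRowStep t s).2.1 = s.2.1 ∧ (pvRowStep t s).2.2.1 = s.2.2.1 := by
        unfold pvRowStep; split <;> simp
      rw [← h1, ← h2, ← h3]

-- ===== VERDICT (by name: the statement is the Claim_ definition above) =====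
theorem expedition_orders_spec : Claim_equal_expedition_orders := by
  intro stock orders today _
  unfold Spec_expedition_orders expedition_orders expedition_orders_alt
  rw [pvFoldA_eq, pvFoldB_split]
  simp only [List.nil_append, pvAExp_filter, pvCounts_eq, pvAFin_eq]
  rfl
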